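-- pv_equiv track=rewrite | github.com/adambuttrick/data_citation_corpus_scripts | european_nucleotide_archive/extract_embl_data/extract_embl_data.py | parse_embl_data
-- ===== SOURCE A (Python) =====
-- from collections import defaultdict
--
-- def parse_embl_data(embl_text):
--     # Extracted from EMBL Data Format - https://bibiserv.cebitec.uni-bielefeld.de/sadr/data_formats/embl_df.html
--     # RX (Reference Cross-reference): optional line type which contains a cross-reference to an external citation or abstract database.
--     # RA (Reference Author): lists the authors of the paper (or other work) cited.
--     # RT (Reference Title): give the title of the paper (or other work).
--     # RL (Reference Location): contains the conventional citation information for the reference.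
--     # CC: free text comments about the entry, and may be used to convey any sort of information thought to be useful.
--     data = defaultdict(list)
--     current_section = None
--     for line in embl_text.split('\n'):
--         if line.startswith('RX'):
--             data['RX'].append(line[5:].strip())
--         elif line.startswith('RA'):
--             data['RA'].append(line[5:].strip())
--         elif line.startswith('RT'):
--             data['RT'].append(line[5:].strip())
--         elif line.startswith('RL'):
--             data['RL'].append(line[5:].strip())
--         elif line.startswith('CC'):
--             data['CC'].append(line[5:].strip())
--     return {k: ' '.join(v) for k, v in data.items()}
-- ===== SOURCE B (Python) =====
-- def parse_embl_data(embl_text):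
--     # Two stages instead of one accumulating pass: first record only the order in
--     # which reference codes first appear, then build each value with its own
--     # filtering pass over the lines (no defaultdict, no per-line branch chain).
--     CODES = ('RX', 'RA', 'RT', 'RL', 'CC')
--     lines = embl_text.split('\n')
--     seen = []
--     for line in lines:
--         code = line[:2]
--         if code in CODES and code not in seen:
--             seen.append(code)
--     return {c: ' '.join(line[5:].strip() for line in lines if line.startswith(c))
--             for c in seen}
-- ===== Notes on version B (the rewrite author's own statement) =====
-- stated objective: alternative
-- what changed: B replaces A's single accumulating pass over a defaultdict-of-lists with an if/elif branch chain and a final join comprehension by two stages: a first pass that only records the first-appearance order of the five codes, then one filtering pass per seen code that builds its joined value directly.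
import Mathlib
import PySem

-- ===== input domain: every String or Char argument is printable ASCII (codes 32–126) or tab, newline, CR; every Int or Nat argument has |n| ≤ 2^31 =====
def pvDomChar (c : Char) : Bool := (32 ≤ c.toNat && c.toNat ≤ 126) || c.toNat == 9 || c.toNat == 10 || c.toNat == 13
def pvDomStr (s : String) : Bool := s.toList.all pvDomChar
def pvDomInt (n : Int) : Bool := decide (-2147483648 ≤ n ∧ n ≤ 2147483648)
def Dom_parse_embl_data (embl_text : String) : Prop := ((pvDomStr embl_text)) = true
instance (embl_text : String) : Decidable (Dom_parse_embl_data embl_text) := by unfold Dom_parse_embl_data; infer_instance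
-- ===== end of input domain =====

-- B replaces A's single accumulating pass over a defaultdict by two stages: one pass recording
-- only the first-appearance order of the codes, then one filtering pass per seen code building
-- its joined value (objective: alternative; same output, including key order).

-- ===== PORT A =====
-- loop body of A's single for-loop (the if/elif chain appending to the defaultdict)
def pvStepA (d : PySem.Dict String (List String)) (line : String) : PySem.Dict String (List String) :=
  if PySem.Str.startswith line "RX" then
    d.insert "RX" (d.getD "RX" [] ++ [PySem.Str.strip (PySem.Str.slice line (some 5) none)])
  else if PySem.Str.startswith line "RA" then
    d.insert "RA" (d.getD "RA" [] ++ [PySem.Str.strip (PySem.Str.slice line (some 5) none)])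
  else if PySem.Str.startswith line "RT" then
    d.insert "RT" (d.getD "RT" [] ++ [PySem.Str.strip (PySem.Str.slice line (some 5) none)])
  else if PySem.Str.startswith line "RL" then
    d.insert "RL" (d.getD "RL" [] ++ [PySem.Str.strip (PySem.Str.slice line (some 5) none)])
  else if PySem.Str.startswith line "CC" then
    d.insert "CC" (d.getD "CC" [] ++ [PySem.Str.strip (PySem.Str.slice line (some 5) none)])
  else d

def parse_embl_data (embl_text : String) : List (String × String) :=
  -- split('\n'): the separator is a non-empty literal, so split? is always `some`
  ((((PySem.Str.split? embl_text "\n").getD []).foldl pvStepA PySem.Dict.empty).items).map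
    (fun p => (p.1, PySem.Str.join " " p.2))

-- ===== PORT B =====
def pvCodes : List String := ["RX", "RA", "RT", "RL", "CC"]

-- line[:2]
def pvCode (line : String) : String := PySem.Str.slice line none (some 2)

-- line[5:].strip()
def pvFrag (line : String) : String := PySem.Str.strip (PySem.Str.slice line (some 5) none)

-- stage-1 loop body: record each code at its first appearance
def pvSeenStep (s : List String) (line : String) : List String :=
  if pvCodes.contains (pvCode line) && !s.contains (pvCode line) then s ++ [pvCode line] else s

-- the generator  (line[5:].strip() for line in lines if line.startswith(c))
def pvFrags (lines : List String) (c : String) : List String :=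
  (lines.filter (fun line => PySem.Str.startswith line c)).map pvFrag

def parse_embl_data_alt (embl_text : String) : List (String × String) :=
  let lines := (PySem.Str.split? embl_text "\n").getD []
  let seen := lines.foldl pvSeenStep []
  seen.map (fun c => (c, PySem.Str.join " " (pvFrags lines c)))

-- ===== PRECONDITION & SPEC =====
def Spec_parse_embl_data (embl_text : String) (out : List (String × String)) : Prop := out = parse_embl_data_alt embl_text
instance (embl_text : String) (out : List (String × String)) : Decidable (Spec_parse_embl_data embl_text out) := by unfold Spec_parse_embl_data; infer_instance

-- ===== CLAIM (what is proved, stated in full; the proofs are below) =====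
def Claim_equal_parse_embl_data : Prop := ∀ (embl_text : String), Dom_parse_embl_data embl_text → Spec_parse_embl_data embl_text (parse_embl_data embl_text)

-- ===== LEMMAS AND PROOFS =====

-- startswith by a 2-character code is exactly 'line[:2] == code'
theorem pvSw (line c : String) (h2 : c.toList.length = 2) :
    PySem.Str.startswith line c = true ↔ pvCode line = c := by
  unfold pvCode
  rw [← String.toList_inj]
  have hs : (PySem.Str.slice line none (some 2)).toList = line.toList.take 2 := by
    rw [PySem.Str.toList_slice, PySem.Chars.slice_eq_listSlice,
      PySem.List.slice_to line.toList (by norm_num : (0:Int) ≤ 2)]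
    rfl
  rw [hs]
  have hb : PySem.Str.startswith line c = PySem.Chars.startswith line.toList c.toList := by
    simp
  rw [hb, PySem.Chars.startswith_iff, List.prefix_iff_eq_take, h2]
  exact ⟨fun h => h.symm, fun h => h.symm⟩

theorem pvSwFalse (line c : String) (h2 : c.toList.length = 2) (h : pvCode line ≠ c) :
    PySem.Str.startswith line c = false := by
  cases hx : PySem.Str.startswith line c with
  | false => rfl
  | true => exact absurd ((pvSw line c h2).mp hx) h

theorem pvCodeLen (c : String) (h : c ∈ pvCodes) : c.toList.length = 2 := by
  simp only [pvCodes, List.mem_cons, List.not_mem_nil, or_false] at h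
  rcases h with h | h | h | h | h <;> subst h <;> decide

-- A's loop body when the line carries one of the five codes
theorem pvStepA_code (d : PySem.Dict String (List String)) (l : String)
    (hc : pvCode l ∈ pvCodes) :
    pvStepA d l = d.insert (pvCode l) (d.getD (pvCode l) [] ++ [pvFrag l]) := by
  have hm := hc
  simp only [pvCodes, List.mem_cons, List.not_mem_nil, or_false] at hm
  have nf : ∀ c : String, c.toList.length = 2 → pvCode l ≠ c →
      ¬ (PySem.Str.startswith l c = true) := fun c h2 hne => by
    rw [pvSwFalse l c h2 hne]; exact Bool.false_ne_true
  unfold pvStepA pvFrag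
  rcases hm with h | h | h | h | h
  · rw [h, if_pos ((pvSw l "RX" (by decide)).mpr h)]
  · rw [h, if_neg (nf "RX" (by decide) (by simp [h])),
      if_pos ((pvSw l "RA" (by decide)).mpr h)]
  · rw [h, if_neg (nf "RX" (by decide) (by simp [h])),
      if_neg (nf "RA" (by decide) (by simp [h])),
      if_pos ((pvSw l "RT" (by decide)).mpr h)]
  · rw [h, if_neg (nf "RX" (by decide) (by simp [h])),
      if_neg (nf "RA" (by decide) (by simp [h])),
      if_neg (nf "RT" (by decide) (by simp [h])),
      if_pos ((pvSw l "RL" (by decide)).mpr h)]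
  · rw [h, if_neg (nf "RX" (by decide) (by simp [h])),
      if_neg (nf "RA" (by decide) (by simp [h])),
      if_neg (nf "RT" (by decide) (by simp [h])),
      if_neg (nf "RL" (by decide) (by simp [h])),
      if_pos ((pvSw l "CC" (by decide)).mpr h)]

-- A's loop body on any other line
theorem pvStepA_nocode (d : PySem.Dict String (List String)) (l : String)
    (hc : pvCode l ∉ pvCodes) : pvStepA d l = d := by
  have nf : ∀ c ∈ pvCodes, ¬ (PySem.Str.startswith l c = true) := fun c h => by
    rw [pvSwFalse l c (pvCodeLen c h) (fun e => hc (e ▸ h))]; exact Bool.false_ne_true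
  unfold pvStepA
  rw [if_neg (nf "RX" (by decide)), if_neg (nf "RA" (by decide)),
    if_neg (nf "RT" (by decide)), if_neg (nf "RL" (by decide)),
    if_neg (nf "CC" (by decide))]

theorem pvSeen_nodup (lines : List String) (s : List String) (h : s.Nodup) :
    (lines.foldl pvSeenStep s).Nodup := by
  induction lines generalizing s with
  | nil => exact h
  | cons l t ih =>
    rw [List.foldl_cons]
    apply ih
    unfold pvSeenStep
    split_ifs with hcond
    · have hmem : pvCode l ∉ s := by
        rcases Bool.and_eq_true_iff.mp hcond with ⟨_, h2⟩
        simpa using h2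
      rw [List.nodup_append]
      exact ⟨h, List.nodup_singleton _,
        by
          intro a ha b hb
          simp only [List.mem_singleton] at hb
          subst hb
          exact fun e => hmem (e ▸ ha)⟩
    · exact h

theorem pvSeen_mem (lines : List String) (s : List String) (c : String) :
    c ∈ lines.foldl pvSeenStep s ↔ c ∈ s ∨ (c ∈ pvCodes ∧ ∃ l ∈ lines, pvCode l = c) := by
  induction lines generalizing s with
  | nil => simp
  | cons l t ih =>
    rw [List.foldl_cons, ih]
    unfold pvSeenStep
    split_ifs with hcond
    · rcases Bool.and_eq_true_iff.mp hcond with ⟨h1, _⟩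
      have h1' : pvCode l ∈ pvCodes := by simpa using h1
      simp only [List.mem_append, List.mem_cons, List.not_mem_nil, or_false]
      constructor
      · rintro ((hs | he) | hr)
        · exact Or.inl hs
        · exact Or.inr ⟨by rw [he]; exact h1', l, Or.inl rfl, he.symm⟩
        · exact Or.inr ⟨hr.1, hr.2.choose, Or.inr hr.2.choose_spec.1, hr.2.choose_spec.2⟩
      · rintro (hs | ⟨hcc, x, hx | hx, hxc⟩)
        · exact Or.inl (Or.inl hs)
        · exact Or.inl (Or.inr (by rw [← hxc, hx]))
        · exact Or.inr ⟨hcc, x, hx, hxc⟩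
    · simp only [List.mem_cons]
      constructor
      · rintro (hs | hr)
        · exact Or.inl hs
        · exact Or.inr ⟨hr.1, hr.2.choose, Or.inr hr.2.choose_spec.1, hr.2.choose_spec.2⟩
      · rintro (hs | ⟨hcc, x, hx | hx, hxc⟩)
        · exact Or.inl hs
        · -- the guard failed, yet pvCode l ∈ pvCodes would force c ∈ s
          subst hx
          have hin : pvCode x ∈ pvCodes := by rw [hxc]; exact hcc
          have hcont : (pvCodes.contains (pvCode x) && !s.contains (pvCode x)) = false := by
            simpa using hcond
          rcases Bool.and_eq_false_iff.mp hcont with h' | h'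
          · exact absurd hin (by simpa using h')
          · exact Or.inl (by rw [← hxc]; simpa using h')
        · exact Or.inr ⟨hcc, x, hx, hxc⟩

theorem pvFrags_concat (p : List String) (l c : String) :
    pvFrags (p ++ [l]) c
      = pvFrags p c ++ (if PySem.Str.startswith l c then [pvFrag l] else []) := by
  unfold pvFrags
  rw [List.filter_append, List.map_append]
  by_cases h : PySem.Str.startswith l c = true
  · have h' : PySem.Chars.startswith l.toList c.toList = true := by simpa using h
    simp [h']
  · have h' : ¬ PySem.Chars.startswith l.toList c.toList = true := by simpa using h
    simp [h']

-- the loop invariant: A's dict lists the seen codes in order, with the filtered fragments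
theorem pvInv (lines : List String) :
    (lines.foldl pvStepA PySem.Dict.empty).items
      = (lines.foldl pvSeenStep []).map (fun c => (c, pvFrags lines c)) := by
  induction lines using List.reverseRecOn with
  | nil => rfl
  | append_singleton p l ih =>
    rw [List.foldl_append, List.foldl_append]
    simp only [List.foldl_cons, List.foldl_nil]
    set S := p.foldl pvSeenStep [] with hS
    set D := p.foldl pvStepA PySem.Dict.empty with hD
    have hSsub : ∀ c ∈ S, c ∈ pvCodes := fun c h => by
      rcases (pvSeen_mem p [] c).mp h with h | h
      · cases h
      · exact h.1
    have hSnd : S.Nodup := pvSeen_nodup p [] List.nodup_nil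
    have hkeys : D.keys = S := by
      simp only [PySem.Dict.keys, ih, List.map_map, Function.comp_def]
      simp
    have hDnd : D.keys.Nodup := hkeys ▸ hSnd
    have hfr : ∀ c ∈ S, pvCode l ≠ c → pvFrags (p ++ [l]) c = pvFrags p c := by
      intro c hcS hne
      rw [pvFrags_concat, pvSwFalse l c (pvCodeLen c (hSsub c hcS)) hne]
      simp
    by_cases hc : pvCode l ∈ pvCodes
    · rw [pvStepA_code D l hc]
      by_cases hmem : pvCode l ∈ S
      · have hcont : D.contains (pvCode l) = true := by
          rw [PySem.Dict.contains_eq_decide_mem_keys, hkeys]; simpa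
        have hseen : pvSeenStep S l = S := by
          unfold pvSeenStep
          rw [if_neg]
          simp [hmem]
        have hgd : D.getD (pvCode l) [] = pvFrags p (pvCode l) := by
          have hmemit : (pvCode l, pvFrags p (pvCode l)) ∈ D.items := by
            rw [ih]; exact List.mem_map.mpr ⟨_, hmem, rfl⟩
          exact PySem.Dict.getD_of_mem_items _ hmemit hDnd _
        rw [hseen, PySem.Dict.items_insert_of_contains _ _ hcont, ih, List.map_map]
        apply List.map_congr_left
        intro c hcS
        simp only [Function.comp_def]
        by_cases heq : c = pvCode l
        · subst heq
          rw [if_pos (beq_self_eq_true _), pvFrags_concat,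
            if_pos ((pvSw l (pvCode l) (pvCodeLen _ hc)).mpr rfl), hgd]
        · rw [if_neg (by simpa using heq), hfr c hcS (fun e => heq e.symm)]
      · have hcont : D.contains (pvCode l) = false := by
          rw [PySem.Dict.contains_eq_decide_mem_keys, hkeys]; simpa
        have hseen : pvSeenStep S l = S ++ [pvCode l] := by
          unfold pvSeenStep
          rw [if_pos]
          simp [hc, hmem]
        have hempty : pvFrags p (pvCode l) = [] := by
          unfold pvFrags
          rw [List.map_eq_nil_iff, List.filter_eq_nil_iff]
          intro a ha hstart
          have := (pvSw a (pvCode l) (pvCodeLen _ hc)).mp hstart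
          exact hmem ((pvSeen_mem p [] (pvCode l)).mpr (Or.inr ⟨hc, a, ha, this⟩))
        have hgd : D.getD (pvCode l) [] = [] := PySem.Dict.getD_of_not_contains D [] hcont
        rw [hseen, PySem.Dict.items_insert_of_not_contains _ _ hcont, ih, List.map_append]
        congr 1
        · apply List.map_congr_left
          intro c hcS
          rw [hfr c hcS (fun e => hmem (e ▸ hcS))]
        · rw [hgd]
          simp only [List.map_cons, List.map_nil]
          rw [pvFrags_concat, if_pos ((pvSw l _ (pvCodeLen _ hc)).mpr rfl), hempty]
    · rw [pvStepA_nocode D l hc]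
      have hseen : pvSeenStep S l = S := by
        unfold pvSeenStep
        rw [if_neg]
        simp [hc]
      rw [hseen, ih]
      apply List.map_congr_left
      intro c hcS
      rw [hfr c hcS (fun e => hc (e ▸ hSsub c hcS))]

-- ===== VERDICT (by name: the statement is the Claim_ definition above) =====
theorem parse_embl_data_spec : Claim_equal_parse_embl_data := by
  intro e _
  unfold Spec_parse_embl_data parse_embl_data parse_embl_data_alt
  rw [pvInv]
  simp [List.map_map, Function.comp_def]
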